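-- pv_equiv track=rewrite | github.com/jcolinpatrick/kryptos | scripts/k3_continuity/e_cfm_07_k3_rotational.py | cw_rotate_perm
-- ===== SOURCE A (Python) =====
-- def cw_rotate_perm(nrows: int, ncols: int) -> list[int]:
--     """Permutation for 90° clockwise rotation of an nrows×ncols grid.
--
--     CW rotation: old[r][c] → new[c][nrows-1-r]
--     New grid is ncols rows × nrows cols.
--
--     Convention: output[new_pos] = input[old_pos] (gather).
--     Text positions: pos = row * width + col.
--     """
--     length = nrows * ncols
--     perm = [0] * length
--     for old_pos in range(length):
--         old_r, old_c = divmod(old_pos, ncols)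
--         new_r = old_c
--         new_c = nrows - 1 - old_r
--         new_pos = new_r * nrows + new_c  # new grid: ncols rows × nrows cols
--         perm[new_pos] = old_pos
--     return perm
-- ===== SOURCE B (Python) =====
-- def cw_rotate_perm(nrows: int, ncols: int) -> list[int]:
--     """Gather form: fill positions in order, each from its rotated source."""
--     def src(new_pos):
--         new_r, new_c = divmod(new_pos, nrows)
--         return (nrows - 1 - new_c) * ncols + new_r
--     return [src(p) for p in range(nrows * ncols)]
-- ===== Notes on version B (the rewrite author's own statement) =====
-- stated objective: idiomatic
-- what changed: B builds the permutation as a gather (a comprehension filling each position in index order from the inverted rotation formula) instead of A's scatter that writes to computed indices of a pre-allocated zero list.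
-- outside the precondition, e.g. on cw_rotate_perm(-2, -2): A returns [1, 3, 2, 0], B returns [6, 3, 5, 2]; on cw_rotate_perm(-1, -1): A raises IndexError, B returns [2]
import Mathlib
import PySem

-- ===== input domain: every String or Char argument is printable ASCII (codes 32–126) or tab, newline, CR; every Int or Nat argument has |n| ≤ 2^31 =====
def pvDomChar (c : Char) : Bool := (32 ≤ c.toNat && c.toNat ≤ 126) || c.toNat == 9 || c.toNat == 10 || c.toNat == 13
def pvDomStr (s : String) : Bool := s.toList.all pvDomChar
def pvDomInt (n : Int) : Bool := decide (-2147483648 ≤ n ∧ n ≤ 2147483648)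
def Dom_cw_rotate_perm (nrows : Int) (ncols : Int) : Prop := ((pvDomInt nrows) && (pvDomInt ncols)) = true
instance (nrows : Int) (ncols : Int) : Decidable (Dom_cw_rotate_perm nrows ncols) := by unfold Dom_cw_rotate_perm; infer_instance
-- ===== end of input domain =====

-- B builds the permutation as a gather (fill each position in index order from the
-- inverted rotation formula) instead of A's scatter into a pre-allocated zero list;
-- objective: idiomatic, same O(nrows*ncols) cost.

-- ===== PORT A =====
-- loop body of A: old_r, old_c = divmod(old_pos, ncols); perm[new_pos] = old_pos.
-- floordiv/mod stand for divmod (exact: ncols > 0 whenever the loop runs under Pre_);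
-- pySetD stands for perm[new_pos] = old_pos (exact under Pre_, where new_pos is always in range).
def cwStepA (nrows : Int) (ncols : Int) (perm : List Int) (old_pos : Int) : List Int :=
  let old_r := PySem.Int.floordiv old_pos ncols
  let old_c := PySem.Int.mod old_pos ncols
  let new_r := old_c
  let new_c := nrows - 1 - old_r
  let new_pos := new_r * nrows + new_c
  PySem.List.pySetD perm new_pos old_pos

def cw_rotate_perm (nrows : Int) (ncols : Int) : List Int :=
  let length := nrows * ncols
  let perm : List Int := List.replicate length.toNat 0
  (PySem.List.pyRange 0 length 1).foldl (cwStepA nrows ncols) perm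

-- ===== PORT B =====
-- src(new_pos): new_r, new_c = divmod(new_pos, nrows); return (nrows-1-new_c)*ncols + new_r
def cwSrcB (nrows : Int) (ncols : Int) (new_pos : Int) : Int :=
  let new_r := PySem.Int.floordiv new_pos nrows
  let new_c := PySem.Int.mod new_pos nrows
  (nrows - 1 - new_c) * ncols + new_r

def cw_rotate_perm_alt (nrows : Int) (ncols : Int) : List Int :=
  (PySem.List.pyRange 0 (nrows * ncols) 1).map (cwSrcB nrows ncols)

-- ===== PRECONDITION & SPEC =====
-- Pre_ excludes grids with BOTH dimensions negative — negative counts, outside the grid's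
-- natural domain — where A either raises IndexError (ncols = -1) or scatters through
-- negative-index wraparound; B's gather returns a different list there.
def Pre_cw_rotate_perm (nrows : Int) (ncols : Int) : Prop := 0 ≤ nrows ∨ 0 ≤ ncols
instance (nrows : Int) (ncols : Int) : Decidable (Pre_cw_rotate_perm nrows ncols) := by unfold Pre_cw_rotate_perm; infer_instance
def pvWitness_cw_rotate_perm : Int × Int := (2, 3)

def Spec_cw_rotate_perm (nrows : Int) (ncols : Int) (out : List Int) : Prop := out = cw_rotate_perm_alt nrows ncols
instance (nrows : Int) (ncols : Int) (out : List Int) : Decidable (Spec_cw_rotate_perm nrows ncols out) := by unfold Spec_cw_rotate_perm; infer_instance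

-- ===== CLAIM (what is proved, stated in full; the proofs are below) =====
def Claim_equal_cw_rotate_perm : Prop := ∀ (nrows : Int) (ncols : Int), Dom_cw_rotate_perm nrows ncols → Pre_cw_rotate_perm nrows ncols → Spec_cw_rotate_perm nrows ncols (cw_rotate_perm nrows ncols)

-- ===== LEMMAS AND PROOFS =====

-- the inverse index map (what B's src computes, over ediv/emod)
def cwInv (nrows : Int) (ncols : Int) (j : Int) : Int :=
  (nrows - 1 - j % nrows) * ncols + j / nrows

-- the forward index map (where A's scatter writes old_pos)
def cwFwd (nrows : Int) (ncols : Int) (p : Int) : Int :=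
  (p % ncols) * nrows + (nrows - 1 - p / ncols)

-- decomposition of a*b + d by emod/ediv when 0 ≤ d < b
theorem cw_emod_ediv_decomp (b a d : Int) (hb : 0 < b) (hd0 : 0 ≤ d) (hd1 : d < b) :
    (a * b + d) % b = d ∧ (a * b + d) / b = a := by
  constructor
  · rw [mul_comm, add_comm, Int.add_mul_emod_self_left, Int.emod_eq_of_lt hd0 hd1]
  · rw [mul_comm, add_comm, Int.add_mul_ediv_left d a (by omega), Int.ediv_eq_zero_of_lt hd0 hd1]
    omega

theorem cw_ediv_lt {b c p : Int} (hb : 0 < b) (_h0 : 0 ≤ p) (h1 : p < c * b) : p / b < c := by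
  have hid := Int.mul_ediv_add_emod p b
  have hm0 : 0 ≤ p % b := Int.emod_nonneg p (by omega)
  nlinarith [Int.emod_lt_of_pos p hb]

theorem cwFwd_bounds {nrows ncols p : Int} (hr : 0 < nrows) (hc : 0 < ncols)
    (h0 : 0 ≤ p) (h1 : p < nrows * ncols) :
    0 ≤ cwFwd nrows ncols p ∧ cwFwd nrows ncols p < nrows * ncols := by
  have hm0 : 0 ≤ p % ncols := Int.emod_nonneg p (by omega)
  have hm1 : p % ncols < ncols := Int.emod_lt_of_pos p hc
  have hq0 : 0 ≤ p / ncols := Int.ediv_nonneg h0 (le_of_lt hc)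
  have hq1 : p / ncols < nrows := cw_ediv_lt hc h0 (by linarith [h1, mul_comm nrows ncols] )
  constructor
  · unfold cwFwd; nlinarith
  · unfold cwFwd; nlinarith

theorem cwInv_bounds {nrows ncols j : Int} (hr : 0 < nrows) (hc : 0 < ncols)
    (h0 : 0 ≤ j) (h1 : j < nrows * ncols) :
    0 ≤ cwInv nrows ncols j ∧ cwInv nrows ncols j < nrows * ncols := by
  have hm0 : 0 ≤ j % nrows := Int.emod_nonneg j (by omega)
  have hm1 : j % nrows < nrows := Int.emod_lt_of_pos j hr
  have hq0 : 0 ≤ j / nrows := Int.ediv_nonneg h0 (le_of_lt hr)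
  have hq1 : j / nrows < ncols := cw_ediv_lt hr h0 (by linarith [h1, mul_comm nrows ncols])
  constructor
  · unfold cwInv; nlinarith
  · unfold cwInv; nlinarith

theorem cwInv_cwFwd {nrows ncols p : Int} (hr : 0 < nrows) (hc : 0 < ncols)
    (h0 : 0 ≤ p) (h1 : p < nrows * ncols) :
    cwInv nrows ncols (cwFwd nrows ncols p) = p := by
  have hq0 : 0 ≤ p / ncols := Int.ediv_nonneg h0 (le_of_lt hc)
  have hq1 : p / ncols < nrows := cw_ediv_lt hc h0 (by linarith [h1, mul_comm nrows ncols])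
  obtain ⟨hm, hd⟩ := cw_emod_ediv_decomp nrows (p % ncols) (nrows - 1 - p / ncols) hr (by omega) (by omega)
  unfold cwInv cwFwd
  rw [hm, hd]
  have hid := Int.mul_ediv_add_emod p ncols
  ring_nf
  ring_nf at hid
  linarith

theorem cwFwd_cwInv {nrows ncols j : Int} (hr : 0 < nrows) (hc : 0 < ncols)
    (h0 : 0 ≤ j) (h1 : j < nrows * ncols) :
    cwFwd nrows ncols (cwInv nrows ncols j) = j := by
  have hm0 : 0 ≤ j % nrows := Int.emod_nonneg j (by omega)
  have hm1 : j % nrows < nrows := Int.emod_lt_of_pos j hr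
  have hq0 : 0 ≤ j / nrows := Int.ediv_nonneg h0 (le_of_lt hr)
  have hq1 : j / nrows < ncols := cw_ediv_lt hr h0 (by linarith [h1, mul_comm nrows ncols])
  obtain ⟨hm, hd⟩ := cw_emod_ediv_decomp ncols (nrows - 1 - j % nrows) (j / nrows) hc hq0 hq1
  unfold cwFwd cwInv
  rw [hm, hd]
  have hid := Int.mul_ediv_add_emod j nrows
  ring_nf
  ring_nf at hid
  linarith

-- A's scatter after the first n writes, as an explicit list
theorem cw_scatter_eq (nrows ncols : Int) (hr : 0 < nrows) (hc : 0 < ncols) :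
    ∀ n : Nat, n ≤ (nrows * ncols).toNat →
    (PySem.List.pyRange 0 (n : Int) 1).foldl (cwStepA nrows ncols)
        (List.replicate (nrows * ncols).toNat 0)
      = (List.range (nrows * ncols).toNat).map
          (fun j : Nat => if cwInv nrows ncols (j : Int) < (n : Int) then cwInv nrows ncols (j : Int) else 0) := by
  intro n
  induction n with
  | zero =>
    intro _
    rw [PySem.List.pyRange_one_eq_nil (by omega)]
    simp only [List.foldl_nil]
    apply List.ext_getElem
    · simp
    · intro j h1 h2
      simp only [List.getElem_replicate, List.getElem_map, List.getElem_range]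
      have hj : (0 : Int) ≤ (j : Int) := by positivity
      have := (cwInv_bounds hr hc hj (by simp at h2; omega) (nrows := nrows) (ncols := ncols)).1
      rw [if_neg (by omega)]
  | succ n ih =>
    intro hn
    have hNL : ((nrows * ncols).toNat : Int) = nrows * ncols := Int.toNat_of_nonneg (by positivity)
    have hnL : (n : Int) < nrows * ncols := by omega
    rw [show ((n + 1 : Nat) : Int) = (n : Int) + 1 by push_cast; ring,
        PySem.List.pyRange_one_succ_right (by positivity), List.foldl_append]
    rw [ih (by omega)]
    simp only [List.foldl_cons, List.foldl_nil]
    have hstep : cwStepA nrows ncols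
        ((List.range (nrows * ncols).toNat).map
          (fun j : Nat => if cwInv nrows ncols (j : Int) < (n : Int) then cwInv nrows ncols (j : Int) else 0)) (n : Int)
        = ((List.range (nrows * ncols).toNat).map
          (fun j : Nat => if cwInv nrows ncols (j : Int) < (n : Int) then cwInv nrows ncols (j : Int) else 0)).set
            (cwFwd nrows ncols (n : Int)).toNat (n : Int) := by
      simp only [cwStepA]
      rw [PySem.Int.floordiv_eq_ediv_of_pos hc, PySem.Int.mod_eq_emod_of_pos hc]
      have hidx : ((n : Int) % ncols) * nrows + (nrows - 1 - (n : Int) / ncols)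
          = cwFwd nrows ncols (n : Int) := by unfold cwFwd; ring
      rw [show ((n : Int) % ncols) * nrows + (nrows - 1 - (n : Int) / ncols)
          = cwFwd nrows ncols (n : Int) from hidx]
      exact PySem.List.pySetD_of_nonneg _ _ (cwFwd_bounds hr hc (by positivity) hnL).1
    rw [hstep]
    have hfb := cwFwd_bounds hr hc (by positivity : (0:Int) ≤ (n : Int)) hnL
    apply List.ext_getElem
    · simp
    · intro j h1 h2
      have hjN : j < (nrows * ncols).toNat := by simpa using h2
      have hjL : (j : Int) < nrows * ncols := by omega
      have hj0 : (0 : Int) ≤ (j : Int) := by positivity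
      rw [List.getElem_set]
      simp only [List.getElem_map, List.getElem_range]
      by_cases hje : (cwFwd nrows ncols (n : Int)).toNat = j
      · have hje' : cwFwd nrows ncols (n : Int) = (j : Int) := by omega
        rw [if_pos hje, ← hje', cwInv_cwFwd hr hc (by positivity) hnL, if_pos (by omega)]
      · have hje' : cwFwd nrows ncols (n : Int) ≠ (j : Int) := by omega
        have hne : cwInv nrows ncols (j : Int) ≠ (n : Int) := by
          intro hcontra
          exact hje' (by rw [← hcontra, cwFwd_cwInv hr hc hj0 hjL])
        rw [if_neg hje]
        by_cases hlt : cwInv nrows ncols (j : Int) < (n : Int)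
        · rw [if_pos hlt, if_pos (by omega)]
        · rw [if_neg hlt, if_neg (by omega)]

theorem cw_spec_main : ∀ (nrows ncols : Int), Pre_cw_rotate_perm nrows ncols →
    cw_rotate_perm nrows ncols = cw_rotate_perm_alt nrows ncols := by
  intro nrows ncols hpre
  by_cases hL : nrows * ncols ≤ 0
  · simp only [cw_rotate_perm, cw_rotate_perm_alt]
    rw [PySem.List.pyRange_one_eq_nil hL]
    simpa using hL
  · have hL' : 0 < nrows * ncols := by omega
    have hrc : 0 < nrows ∧ 0 < ncols := by
      rcases mul_pos_iff.mp hL' with ⟨h1, h2⟩ | ⟨h1, h2⟩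
      · exact ⟨h1, h2⟩
      · rcases hpre with h | h <;> omega
    obtain ⟨hr, hc⟩ := hrc
    have hNL : ((nrows * ncols).toNat : Int) = nrows * ncols := Int.toNat_of_nonneg (by omega)
    simp only [cw_rotate_perm, cw_rotate_perm_alt]
    rw [show nrows * ncols = (((nrows * ncols).toNat : Nat) : Int) from hNL.symm]
    simp only [Int.toNat_natCast]
    rw [cw_scatter_eq nrows ncols hr hc (nrows * ncols).toNat (le_refl _)]
    rw [PySem.List.pyRange_one, List.map_map]
    apply List.map_congr_left
    intro j hj
    have hjN : j < (nrows * ncols).toNat := by simpa using hj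
    have hj0 : (0 : Int) ≤ (j : Int) := by positivity
    have hjL : (j : Int) < nrows * ncols := by omega
    have hb := cwInv_bounds hr hc hj0 hjL
    rw [if_pos (by omega)]
    simp only [Function.comp_apply, zero_add]
    unfold cwSrcB cwInv
    rw [PySem.Int.floordiv_eq_ediv_of_pos hr, PySem.Int.mod_eq_emod_of_pos hr]

-- ===== VERDICT (by name: the statement is the Claim_ definition above) =====
theorem cw_rotate_perm_spec : Claim_equal_cw_rotate_perm := by
  intro nrows ncols _ hpre
  exact cw_spec_main nrows ncols hpre
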